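-- pv_equiv track=rewrite | github.com/joshuago78/aoc | 2015/day05.py | is_nice2
-- ===== SOURCE A (Python) =====
-- def is_nice2(line):
--     has_pair_repeat = False
--     has_gapped_repeat = False
--     pairs = {}
--     for i in range(len(line)):
--         if i>1 and line[i]==line[i-2]:
--             has_gapped_repeat = True
--         if i>0:
--             new_pair = str(line[i-1:i+1])
--             if new_pair in pairs.keys():
--                 for (j,k) in pairs[new_pair]:
--                     if k != i-1:
--                         has_pair_repeat = True
--                         break
--                 pairs[new_pair].append((i-1,i))
--             else:
--                 pairs[new_pair] = [(i-1,i),]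
--     return has_pair_repeat and has_gapped_repeat
-- ===== SOURCE B (Python) =====
-- def is_nice2(line):
--     cs = list(line)
--     gap = any(a == c for a, c in zip(cs, cs[2:]))
--     pair_rep = False
--     first = {}
--     for i, p in enumerate(zip(cs, cs[1:])):
--         if p in first:
--             if first[p] + 2 <= i:
--                 pair_rep = True
--         else:
--             first[p] = i
--     return gap and pair_rep
-- ===== Notes on version B (the rewrite author's own statement) =====
-- stated objective: faster
-- what changed: Replaces A's single index loop with per-pair occurrence lists (appended to and scanned with a break, plus a string slice per step) by two index-free passes over the character list: the gapped repeat as an any over zip(cs, cs[2:]), and the pair repeat as a fold over enumerate(zip(cs, cs[1:])) keeping only the earliest index per character-pair key, checked in O(1) instead of scanning an occurrence list.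
import Mathlib
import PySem

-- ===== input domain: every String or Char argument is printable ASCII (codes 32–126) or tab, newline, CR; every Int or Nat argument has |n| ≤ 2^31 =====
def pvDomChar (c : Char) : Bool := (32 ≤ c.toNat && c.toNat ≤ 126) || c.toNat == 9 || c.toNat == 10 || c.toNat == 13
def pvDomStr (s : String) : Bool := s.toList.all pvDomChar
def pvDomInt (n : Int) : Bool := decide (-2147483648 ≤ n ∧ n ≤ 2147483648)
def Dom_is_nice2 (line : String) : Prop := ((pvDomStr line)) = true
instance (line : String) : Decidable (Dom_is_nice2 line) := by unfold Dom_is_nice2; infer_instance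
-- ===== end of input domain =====

-- B recomputes the same predicate with two index-free passes over the character list (a zip
-- 'any' for the gapped repeat, a fold over enumerated character pairs keeping only the earliest
-- index per pair) instead of A's index loop with per-pair occurrence lists scanned with a break.


-- ===== PORT A =====
def pvBodyA (line : String) (st : Bool × Bool × PySem.Dict String (List (Int × Int))) (i : Int) :
    Bool × Bool × PySem.Dict String (List (Int × Int)) :=
  let hg := if 1 < i ∧ PySem.Str.pyGet? line i = PySem.Str.pyGet? line (i - 2) then true else st.2.1
  if 0 < i then
    let np := PySem.Str.slice line (some (i - 1)) (some (i + 1))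
    match st.2.2.get? np with
    | some lst =>
        -- inner 'for (j,k) … break' only sets has_pair_repeat: it is 'any (k != i-1)'
        (st.1 || lst.any (fun jk => jk.2 != i - 1), hg, st.2.2.insert np (lst ++ [(i - 1, i)]))
    | none => (st.1, hg, st.2.2.insert np [(i - 1, i)])
  else (st.1, hg, st.2.2)

def is_nice2 (line : String) : Bool :=
  let r := (PySem.List.pyRange 0 (PySem.Str.len line)).foldl (pvBodyA line)
            (false, false, PySem.Dict.empty)
  r.1 && r.2.1

-- ===== PORT B =====
def pvStepB (st : Bool × PySem.Dict (Char × Char) Int) (ip : Int × (Char × Char)) :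
    Bool × PySem.Dict (Char × Char) Int :=
  match st.2.get? ip.2 with
  | some e => (if e + 2 ≤ ip.1 then true else st.1, st.2)
  | none => (st.1, st.2.insert ip.2 ip.1)

def is_nice2_alt (line : String) : Bool :=
  let cs := line.toList
  let gap := (cs.zip (cs.drop 2)).any (fun pc => pc.1 == pc.2)
  let pairRep := ((PySem.List.enumerate (cs.zip cs.tail) 0).foldl pvStepB
                   (false, PySem.Dict.empty)).1
  gap && pairRep

-- ===== PRECONDITION & SPEC =====
def Spec_is_nice2 (line : String) (out : Bool) : Prop := out = is_nice2_alt line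
instance (line : String) (out : Bool) : Decidable (Spec_is_nice2 line out) := by unfold Spec_is_nice2; infer_instance

-- ===== CLAIM (what is proved, stated in full; the proofs are below) =====
def Claim_equal_is_nice2 : Prop := ∀ (line : String), Dom_is_nice2 line → Spec_is_nice2 line (is_nice2 line)

-- ===== LEMMAS AND PROOFS =====

-- STAGE 1: A's fold equals an intermediate "earliest start per pair-string" fold (pvMid*).

def pvMidBody (line : String) (st : Bool × Bool × PySem.Dict String Int) (i : Int) :
    Bool × Bool × PySem.Dict String Int :=
  let hg := if 2 ≤ i ∧ PySem.Str.pyGet? line i = PySem.Str.pyGet? line (i - 2) then true else st.1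
  let pair := PySem.Str.slice line (some (i - 1)) (some (i + 1))
  match st.2.2.get? pair with
  | some e => (hg, st.2.1 || decide (e ≤ i - 3), st.2.2)
  | none => (hg, st.2.1, st.2.2.insert pair (i - 1))

-- prefix states of the two loops after processing range indices below m
def pvStepsA (line : String) (m : Nat) : Bool × Bool × PySem.Dict String (List (Int × Int)) :=
  (PySem.List.pyRange 0 (m : Int)).foldl (pvBodyA line) (false, false, PySem.Dict.empty)

def pvStepsM (line : String) (m : Nat) : Bool × Bool × PySem.Dict String Int :=
  (PySem.List.pyRange 1 (m : Int)).foldl (pvMidBody line) (false, false, PySem.Dict.empty)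

-- the pair key recorded for start index j
def pvKey (line : String) (j : Nat) : String :=
  PySem.Str.slice line (some (j : Int)) (some ((j : Int) + 2))

-- start indices j < m-1 whose pair equals p, in increasing order
def pvOcc (line : String) (p : String) (m : Nat) : List Nat :=
  (List.range (m - 1)).filter (fun j => pvKey line j == p)

lemma pvStepsA_succ (line : String) (m : Nat) :
    pvStepsA line (m + 1) = pvBodyA line (pvStepsA line m) (m : Int) := by
  unfold pvStepsA
  rw [show ((m + 1 : Nat) : Int) = (m : Int) + 1 by push_cast; ring,
      PySem.List.pyRange_one_succ_right (by positivity), List.foldl_append]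
  rfl

lemma pvStepsM_succ (line : String) (m : Nat) (hm : 1 ≤ m) :
    pvStepsM line (m + 1) = pvMidBody line (pvStepsM line m) (m : Int) := by
  unfold pvStepsM
  rw [show ((m + 1 : Nat) : Int) = (m : Int) + 1 by push_cast; ring,
      PySem.List.pyRange_one_succ_right (by exact_mod_cast hm), List.foldl_append]
  rfl

lemma pvOcc_succ (line : String) (p : String) (m : Nat) (hm : 1 ≤ m) :
    pvOcc line p (m + 1) =
      pvOcc line p m ++ (if pvKey line (m - 1) == p then [m - 1] else []) := by
  unfold pvOcc
  rw [show m + 1 - 1 = (m - 1) + 1 by omega, List.range_succ, List.filter_append]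
  simp only [List.filter]
  cases pvKey line (m - 1) == p <;> rfl

lemma pvOcc_pairwise (line : String) (p : String) (m : Nat) :
    (pvOcc line p m).Pairwise (· < ·) :=
  (List.pairwise_lt_range).filter _

lemma pvOcc_mem_lt (line : String) (p : String) (m : Nat) {j : Nat}
    (h : j ∈ pvOcc line p m) : j < m - 1 := by
  have := List.mem_filter.mp h
  exact List.mem_range.mp this.1

def pvInv (line : String) (m : Nat) : Prop :=
  (pvStepsA line m).1 = (pvStepsM line m).2.1 ∧
  (pvStepsA line m).2.1 = (pvStepsM line m).1 ∧
  ∀ p : String,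
    ((pvStepsA line m).2.2.get? p =
      if pvOcc line p m = [] then none
      else some ((pvOcc line p m).map (fun (j : Nat) => ((j : Int), (j : Int) + 1)))) ∧
    (pvStepsM line m).2.2.get? p = (pvOcc line p m).head?.map (fun (j : Nat) => (j : Int))

lemma pvInv_zero (line : String) : pvInv line 0 := by
  unfold pvInv pvStepsA pvStepsM pvOcc
  simp [PySem.List.pyRange]

lemma pvInv_one (line : String) : pvInv line 1 := by
  unfold pvInv pvStepsA pvStepsM pvOcc
  simp [PySem.List.pyRange, pvBodyA]

lemma pvInv_step (line : String) (m : Nat) (hm : 1 ≤ m) (ih : pvInv line m) :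
    pvInv line (m + 1) := by
  obtain ⟨ih1, ih2, ih3⟩ := ih
  obtain ⟨k, rfl⟩ : ∃ k, m = k + 1 := ⟨m - 1, by omega⟩
  have hA := pvStepsA_succ line (k + 1)
  have hB := pvStepsM_succ line (k + 1) (by omega)
  have hP : PySem.Str.slice line (some (((k + 1 : Nat) : Int) - 1)) (some (((k + 1 : Nat) : Int) + 1))
      = pvKey line k := by
    unfold pvKey
    have e1 : ((k + 1 : Nat) : Int) - 1 = ((k : Nat) : Int) := by push_cast; ring
    have e2 : ((k + 1 : Nat) : Int) + 1 = ((k : Nat) : Int) + 2 := by push_cast; ring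
    rw [e1, e2]
  have hocc : ∀ p, pvOcc line p (k + 1 + 1) =
      pvOcc line p (k + 1) ++ (if pvKey line k == p then [k] else []) := by
    intro p
    have := pvOcc_succ line p (k + 1) (by omega)
    simpa using this
  have hgEq : (if 1 < ((k + 1 : Nat) : Int) ∧
        PySem.Str.pyGet? line ((k + 1 : Nat) : Int) = PySem.Str.pyGet? line (((k + 1 : Nat) : Int) - 2)
        then true else (pvStepsA line (k + 1)).2.1)
      = (if 2 ≤ ((k + 1 : Nat) : Int) ∧
        PySem.Str.pyGet? line ((k + 1 : Nat) : Int) = PySem.Str.pyGet? line (((k + 1 : Nat) : Int) - 2)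
        then true else (pvStepsM line (k + 1)).1) := by
    rw [ih2]
    exact if_congr (and_congr_left' (by push_cast; omega)) rfl rfl
  have hpos : (0 : Int) < ((k + 1 : Nat) : Int) := by push_cast; omega
  obtain ⟨hgA, hgB⟩ := ih3 (pvKey line k)
  unfold pvInv
  rw [hA, hB]
  cases hnil : pvOcc line (pvKey line k) (k + 1) with
  | nil =>
    rw [hnil] at hgA hgB
    rw [if_pos rfl] at hgA
    rw [List.head?_nil] at hgB
    simp at hgB
    simp only [pvBodyA, pvMidBody, hP, hgA, hgB, if_pos hpos]
    refine ⟨ih1, hgEq, ?_⟩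
    intro p
    by_cases hp : p = pvKey line k
    · subst hp
      rw [PySem.Dict.get?_insert_self, PySem.Dict.get?_insert_self, hocc, hnil]
      simp
    · have hkp : (pvKey line k == p) = false := by simpa using Ne.symm hp
      rw [PySem.Dict.get?_insert_of_ne _ _ hp, PySem.Dict.get?_insert_of_ne _ _ hp]
      simpa [hocc p, hkp] using ih3 p
  | cons e rest =>
    rw [hnil] at hgA hgB
    rw [if_neg (by simp)] at hgA
    rw [List.head?_cons] at hgB
    simp at hgB
    simp only [pvBodyA, pvMidBody, hP, hgA, hgB, if_pos hpos]
    have hanyEq : ((e :: rest).map (fun (j : Nat) => ((j : Int), (j : Int) + 1))).any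
          (fun jk => jk.2 != ((k + 1 : Nat) : Int) - 1)
        = decide (((e : Nat) : Int) ≤ ((k + 1 : Nat) : Int) - 3) := by
      have hlt : ∀ j ∈ e :: rest, j < k := by
        intro j hj
        have := pvOcc_mem_lt line (pvKey line k) (k + 1) (hnil ▸ hj)
        omega
      have hmin : ∀ j ∈ e :: rest, e ≤ j := by
        have hpw := pvOcc_pairwise line (pvKey line k) (k + 1)
        rw [hnil] at hpw
        intro j hj
        rcases List.mem_cons.mp hj with rfl | hj
        · exact le_refl _
        · exact le_of_lt ((List.pairwise_cons.mp hpw).1 j hj)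
      rw [Bool.eq_iff_iff]
      simp only [List.any_map, List.any_eq_true, Function.comp, bne_iff_ne, ne_eq,
        decide_eq_true_eq]
      constructor
      · rintro ⟨j, hj, hne⟩
        have h1 := hlt j hj
        have h2 := hmin j hj
        have h3 := hlt e (List.mem_cons_self)
        push_cast at hne ⊢
        omega
      · intro he
        refine ⟨e, List.mem_cons_self, ?_⟩
        push_cast at he ⊢
        omega
    refine ⟨?_, hgEq, ?_⟩
    · rw [ih1, hanyEq]
    intro p
    by_cases hp : p = pvKey line k
    · subst hp
      rw [PySem.Dict.get?_insert_self, hocc, hnil]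
      constructor
      · rw [if_neg (by simp)]
        simp
      · rw [hgB]
        simp
    · have hkp : (pvKey line k == p) = false := by simpa using Ne.symm hp
      rw [PySem.Dict.get?_insert_of_ne _ _ hp]
      simpa [hocc p, hkp] using ih3 p

lemma pvInv_all (line : String) (m : Nat) : pvInv line m := by
  induction m with
  | zero => exact pvInv_zero line
  | succ k ih =>
    rcases Nat.eq_zero_or_pos k with hk | hk
    · subst hk; exact pvInv_one line
    · exact pvInv_step line k hk ih

-- STAGE 2: the intermediate fold equals B's two passes.

-- prefix state of B's pair loop: pair starts below m - 1 processed
def pvStepsN (cs : List Char) (m : Nat) : Bool × PySem.Dict (Char × Char) Int :=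
  (PySem.List.enumerate ((cs.zip cs.tail).take (m - 1)) 0).foldl pvStepB
    (false, PySem.Dict.empty)

-- closed form of the gapped-repeat flag after processing indices below m
def pvGapA (line : String) (m : Nat) : Bool :=
  (List.range m).any (fun i =>
    decide (2 ≤ i) && (PySem.Str.pyGet? line (i : Int) == PySem.Str.pyGet? line ((i : Int) - 2)))

lemma pvGet_at (line : String) (i : Nat) (h : i < line.toList.length) :
    PySem.Str.pyGet? line (i : Int) = some (line.toList[i]'h) := by
  simp [PySem.Str.pyGet?]

lemma pvSlice_pair (line : String) (j : Nat) (h : j + 1 < line.toList.length) :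
    PySem.Str.slice line (some (j : Int)) (some ((j : Int) + 2))
      = String.ofList [line.toList[j]'(by omega), line.toList[j + 1]'h] := by
  apply String.toList_inj.mp
  rw [String.toList_ofList]
  have hb : (PySem.Str.slice line (some (j : Int)) (some ((j : Int) + 2))).toList
      = PySem.List.slice line.toList (some (j : Int)) (some ((j : Int) + 2)) := by
    simp [PySem.Str.slice]
  rw [hb, show ((j : Int) + 2) = ((j : Int) + ((2 : Nat) : Int)) by push_cast; ring,
      PySem.List.slice_natCast_add]
  rw [List.drop_eq_getElem_cons (by omega : j < line.toList.length),
      List.drop_eq_getElem_cons h]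
  rfl

lemma pvZip_getElem (cs : List Char) (k : Nat) (h : k + 1 < cs.length) :
    (cs.zip cs.tail)[k]'(by simp [List.length_zip, List.length_tail]; omega)
      = (cs[k]'(by omega), cs[k + 1]'h) := by
  have : cs.tail[k]'(by simp [List.length_tail]; omega) = cs[k + 1]'h := by
    simp [List.getElem_tail]
  simp [List.getElem_zip, this]

lemma pvStepsN_succ (cs : List Char) (m : Nat) (hm : 1 ≤ m) (hmn : m < cs.length) :
    pvStepsN cs (m + 1) =
      pvStepB (pvStepsN cs m)
        (((m - 1 : Nat) : Int), (cs.zip cs.tail)[m - 1]'(by simp [List.length_zip, List.length_tail]; omega)) := by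
  have hlen : m - 1 < (cs.zip cs.tail).length := by
    simp [List.length_zip, List.length_tail]; omega
  have hmin : min ((m - 1 : Nat) : Int) ((cs.length - 1 : Nat) : Int) = ((m - 1 : Nat) : Int) := by
    omega
  unfold pvStepsN
  rw [show m + 1 - 1 = (m - 1) + 1 by omega, List.take_add_one,
      List.getElem?_eq_getElem hlen]
  rw [PySem.List.enumerate_append, List.foldl_append]
  simp [List.length_take, hmin]

def pvInv2 (line : String) (m : Nat) : Prop :=
  (pvStepsM line m).2.1 = (pvStepsN line.toList m).1 ∧
  (pvStepsM line m).1 = pvGapA line m ∧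
  ∀ q : Char × Char,
    (pvStepsM line m).2.2.get? (String.ofList [q.1, q.2]) = (pvStepsN line.toList m).2.get? q

lemma pvInv2_zero (line : String) : pvInv2 line 0 := by
  unfold pvInv2 pvStepsM pvStepsN pvGapA
  simp [PySem.List.pyRange]

lemma pvInv2_one (line : String) : pvInv2 line 1 := by
  unfold pvInv2 pvStepsM pvStepsN pvGapA
  simp [PySem.List.pyRange]

lemma pvInv2_step (line : String) (m : Nat) (hm : 1 ≤ m) (hmn : m < line.toList.length)
    (ih : pvInv2 line m) : pvInv2 line (m + 1) := by
  obtain ⟨ih1, ih2, ih3⟩ := ih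
  have hM := pvStepsM_succ line m hm
  have hN := pvStepsN_succ line.toList m hm hmn
  have hz := pvZip_getElem line.toList (m - 1) (by omega)
  have hsl : PySem.Str.slice line (some ((m : Int) - 1)) (some ((m : Int) + 1))
      = String.ofList [line.toList[m - 1]'(by omega), line.toList[(m - 1) + 1]'(by omega)] := by
    rw [show ((m : Int) - 1) = ((m - 1 : Nat) : Int) by omega,
        show ((m : Int) + 1) = ((m - 1 : Nat) : Int) + 2 by omega]
    exact pvSlice_pair line (m - 1) (by omega)
  -- gap flag step
  have hgap : (if 2 ≤ (m : Int) ∧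
        PySem.Str.pyGet? line (m : Int) = PySem.Str.pyGet? line ((m : Int) - 2)
        then true else (pvStepsM line m).1) = pvGapA line (m + 1) := by
    unfold pvGapA
    rw [List.range_succ, List.any_append, ← pvGapA, ih2]
    by_cases hc : 2 ≤ (m : Int) ∧
        PySem.Str.pyGet? line (m : Int) = PySem.Str.pyGet? line ((m : Int) - 2)
    · have hx : (decide (2 ≤ m) && (PySem.Str.pyGet? line (m : Int) == PySem.Str.pyGet? line ((m : Int) - 2))) = true := by
        simp only [Bool.and_eq_true, decide_eq_true_eq, beq_iff_eq]
        exact ⟨by exact_mod_cast hc.1, hc.2⟩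
      rw [if_pos hc, show ([m].any _ = _) from List.any_cons.trans (by rw [List.any_nil, Bool.or_false]), hx, Bool.or_true]
    · have hx : (decide (2 ≤ m) && (PySem.Str.pyGet? line (m : Int) == PySem.Str.pyGet? line ((m : Int) - 2))) = false := by
        rw [Bool.and_eq_false_iff]
        by_cases h2 : 2 ≤ m
        · right
          rw [beq_eq_false_iff_ne]
          intro he
          exact hc ⟨by exact_mod_cast h2, he⟩
        · left; simpa using h2
      rw [if_neg hc, show ([m].any _ = _) from List.any_cons.trans (by rw [List.any_nil, Bool.or_false]), hx, Bool.or_false]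
  have hkey : (pvStepsM line m).2.2.get?
        (String.ofList [line.toList[m - 1]'(by omega), line.toList[(m - 1) + 1]'(by omega)])
      = (pvStepsN line.toList m).2.get?
        (line.toList[m - 1]'(by omega), line.toList[(m - 1) + 1]'(by omega)) :=
    ih3 (line.toList[m - 1]'(by omega), line.toList[(m - 1) + 1]'(by omega))
  rw [pvInv2, hM, hN, hz]
  cases hq : (pvStepsN line.toList m).2.get?
      (line.toList[m - 1]'(by omega), line.toList[(m - 1) + 1]'(by omega)) with
  | some e =>
    rw [hq] at hkey
    simp only [pvMidBody, pvStepB, hsl, hkey, hq]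
    refine ⟨?_, hgap, ih3⟩
    rw [ih1]
    by_cases hd : e + 2 ≤ ((m - 1 : Nat) : Int)
    · rw [if_pos hd, decide_eq_true (show e ≤ (m : Int) - 3 by omega), Bool.or_true]
    · rw [if_neg hd, decide_eq_false (show ¬ e ≤ (m : Int) - 3 by omega), Bool.or_false]
  | none =>
    rw [hq] at hkey
    simp only [pvMidBody, pvStepB, hsl, hkey, hq]
    refine ⟨ih1, hgap, ?_⟩
    intro q
    by_cases hpq : q = (line.toList[m - 1]'(by omega), line.toList[(m - 1) + 1]'(by omega))
    · rw [hpq]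
      rw [PySem.Dict.get?_insert_self, PySem.Dict.get?_insert_self]
      congr 1
      omega
    · have hs : String.ofList [q.1, q.2]
          ≠ String.ofList [line.toList[m - 1]'(by omega), line.toList[(m - 1) + 1]'(by omega)] := by
        intro he
        apply hpq
        have h2 := String.ofList_inj.mp he
        simp at h2
        exact Prod.ext h2.1 h2.2
      rw [PySem.Dict.get?_insert_of_ne _ _ hs, PySem.Dict.get?_insert_of_ne _ _ hpq]
      exact ih3 q

lemma pvInv2_all (line : String) (m : Nat) (hm : m ≤ line.toList.length) : pvInv2 line m := by
  induction m with
  | zero => exact pvInv2_zero line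
  | succ k ih =>
    rcases Nat.eq_zero_or_pos k with hk | hk
    · subst hk; exact pvInv2_one line
    · exact pvInv2_step line k hk (by omega) (ih (by omega))

lemma pvGapA_eq_zipAny (line : String) :
    pvGapA line line.toList.length
      = (line.toList.zip (line.toList.drop 2)).any (fun pc => pc.1 == pc.2) := by
  rw [Bool.eq_iff_iff]
  unfold pvGapA
  simp only [List.any_eq_true, List.mem_range, Bool.and_eq_true, decide_eq_true_eq, beq_iff_eq]
  constructor
  · rintro ⟨i, hi, h2, heq⟩
    rw [pvGet_at line i hi,
        show ((i : Int) - 2) = ((i - 2 : Nat) : Int) by omega,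
        pvGet_at line (i - 2) (by omega)] at heq
    refine ⟨(line.toList[i-2]'(by omega), line.toList[i]'hi), ?_, by
      simpa using (Option.some.inj heq).symm⟩
    rw [List.mem_iff_getElem]
    refine ⟨i - 2, by simp only [List.length_zip, List.length_drop]; omega, ?_⟩
    rw [List.getElem_zip, List.getElem_drop]
    congr 2
    omega
  · rintro ⟨pc, hmem, heq⟩
    rw [List.mem_iff_getElem] at hmem
    obtain ⟨k, hk, hpc⟩ := hmem
    simp only [List.length_zip, List.length_drop] at hk
    have hk' : k + 2 < line.toList.length := by omega
    rw [List.getElem_zip, List.getElem_drop] at hpc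
    refine ⟨k + 2, by omega, by omega, ?_⟩
    rw [pvGet_at line (k + 2) hk',
        show (((k + 2 : Nat) : Int) - 2) = ((k : Nat) : Int) by omega,
        pvGet_at line k (by omega)]
    rw [← hpc] at heq
    simp only [show 2 + k = k + 2 from by omega] at heq
    exact congrArg some heq.symm

-- ===== VERDICT (by name: the statement is the Claim_ definition above) =====
theorem is_nice2_spec : Claim_equal_is_nice2 := by
  intro line _
  unfold Spec_is_nice2 is_nice2 is_nice2_alt
  obtain ⟨a1, a2, -⟩ := pvInv_all line line.toList.length
  obtain ⟨b1, b2, -⟩ := pvInv2_all line line.toList.length le_rfl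
  rw [PySem.Str.len_eq]
  change ((pvStepsA line line.toList.length).1 && (pvStepsA line line.toList.length).2.1) = _
  rw [a1, b1, a2, b2, pvGapA_eq_zipAny]
  have htake : (line.toList.zip line.toList.tail).take (line.toList.length - 1)
      = line.toList.zip line.toList.tail :=
    List.take_of_length_le (by simp only [List.length_zip, List.length_tail]; omega)
  unfold pvStepsN
  rw [htake, Bool.and_comm]
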